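-- pv_equiv track=rewrite | github.com/donate110/sn103 | validator/djinn_validator/core/mpc_outcome.py | plan_parallel_powers
-- ===== SOURCE A (Python) =====
-- def plan_parallel_powers(max_power: int) -> list[list[tuple[int, int]]]:
--     """Plan O(log n) rounds of parallel Beaver triple multiplications.
--
--     Given max_power, returns a list of rounds. Each round is a list of
--     (a, b) tuples meaning "compute s^(a+b) = s^a * s^b". All
--     multiplications in a round use only powers available from previous
--     rounds (plus s^1 which is always known).
--
--     Round 1: compute s^2 = s^1 * s^1
--     Round 2: compute s^3 = s^2 * s^1, s^4 = s^2 * s^2 (parallel)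
--     Round 3: compute s^5..s^8 from known powers (parallel)
--     Each round roughly doubles the set of known powers.
--
--     Returns:
--         List of rounds, where each round is a list of (a, b) factor pairs.
--     """
--     if max_power < 2:
--         return []
--
--     known = {1}
--     rounds: list[list[tuple[int, int]]] = []
--
--     while max(known) < max_power:
--         # Plan this round: compute new powers from known ones
--         round_ops: list[tuple[int, int]] = []
--         sorted_known = sorted(known)
--
--         # Greedily fill in missing powers using known ones
--         new_targets: set[int] = set()
--         for target in range(min(known) + 1, max_power + 1):
--             if target in known:
--                 continue
--             # Find a factorization (a, b) where both are known
--             found = False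
--             for a in sorted_known:
--                 b = target - a
--                 if b >= 1 and b in known:
--                     round_ops.append((a, b))
--                     new_targets.add(target)
--                     found = True
--                     break
--             if not found:
--                 break  # Can't compute this target yet; next round
--
--         if not round_ops:
--             # Shouldn't happen, but safety valve
--             break
--
--         rounds.append(round_ops)
--         known |= new_targets
--
--     return rounds
-- ===== SOURCE B (Python) =====
-- def plan_parallel_powers(max_power: int) -> list[list[tuple[int, int]]]:
--     """Closed-form planner: known powers are always the contiguous block 1..m,
--     so round r simply computes t = m+1 .. min(2m, max_power) as s^t = s^(t-m) * s^m."""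
--     if max_power < 2:
--         return []
--
--     def rounds_from(m: int) -> list[list[tuple[int, int]]]:
--         if m >= max_power:
--             return []
--         top = min(2 * m, max_power)
--         return [[(t - m, m) for t in range(m + 1, top + 1)]] + rounds_from(top)
--
--     return rounds_from(1)
-- ===== Notes on version B (the rewrite author's own statement) =====
-- stated objective: faster
-- what changed: B replaces A's per-round rescan of all targets with an inner search over the known set by the closed form: the known set is always the contiguous block 1..m, so each round is emitted directly as pairs (t-m, m) for t in m+1..min(2m, max_power).
import Mathlib
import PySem

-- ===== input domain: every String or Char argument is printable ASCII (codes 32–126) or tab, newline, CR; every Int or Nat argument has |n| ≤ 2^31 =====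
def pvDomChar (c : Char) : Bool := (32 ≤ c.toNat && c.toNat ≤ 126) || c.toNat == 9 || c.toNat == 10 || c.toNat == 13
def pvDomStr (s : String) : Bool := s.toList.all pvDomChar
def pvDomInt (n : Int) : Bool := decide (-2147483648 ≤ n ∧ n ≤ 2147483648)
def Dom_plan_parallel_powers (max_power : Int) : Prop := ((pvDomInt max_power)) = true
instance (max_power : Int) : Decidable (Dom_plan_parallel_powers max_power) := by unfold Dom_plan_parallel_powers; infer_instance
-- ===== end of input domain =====

-- B replaces A's quadratic per-round target/factor search with the closed form over the
-- contiguous known block 1..m (pairs (t-m, m) per round); B is asymptotically faster.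

-- ===== PORT A =====
-- inner 'for a in sorted_known' loop with break: first factorization (a, b), both known
def pvFindFactor (sorted_known : List Int) (known : PySem.Set Int) (target : Int) :
    Option (Int × Int) :=
  match sorted_known with
  | [] => none
  | a :: rest =>
    let b := target - a
    if 1 ≤ b ∧ b ∈ known then some (a, b)
    else pvFindFactor rest known target

-- middle 'for target in range(...)' loop with continue/break, carrying round_ops and new_targets
def pvTargetLoop (targets : List Int) (sk : List Int) (known : PySem.Set Int)
    (ops : List (Int × Int)) (nt : PySem.Set Int) : List (Int × Int) × PySem.Set Int :=
  match targets with
  | [] => (ops, nt)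
  | t :: ts =>
    if t ∈ known then pvTargetLoop ts sk known ops nt
    else
      match pvFindFactor sk known t with
      | some p => pvTargetLoop ts sk known (ops ++ [p]) (PySem.Set.add nt t)
      | none => (ops, nt)

-- outer 'while max(known) < max_power' loop; fuel only makes it total (the loop grows
-- max(known) every iteration, so max_power.toNat + 1 steps are never exhausted)
def pvOuter (fuel : Nat) (known : PySem.Set Int) (rounds : List (List (Int × Int)))
    (max_power : Int) : List (List (Int × Int)) :=
  match fuel with
  | 0 => rounds
  | f + 1 =>
    match PySem.List.max? known (fun x => x), PySem.List.min? known (fun x => x) with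
    | some mx, some mn =>
      if mx < max_power then
        let sk := PySem.List.sorted known (fun x => x) false
        let r := pvTargetLoop (PySem.List.pyRange (mn + 1) (max_power + 1) 1) sk known
                   [] PySem.Set.empty
        if r.1 = [] then rounds
        else pvOuter f (PySem.Set.union known r.2) (rounds ++ [r.1]) max_power
      else rounds
    | _, _ => rounds

def plan_parallel_powers (max_power : Int) : List (List (Int × Int)) :=
  if max_power < 2 then []
  else pvOuter (max_power.toNat + 1) (PySem.Set.ofList [1]) [] max_power

-- ===== PORT B =====
-- Source B's rounds_from(m); fuel only makes the recursion total (m grows by ≥ 1 per call)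
def pvAlt (fuel : Nat) (m max_power : Int) : List (List (Int × Int)) :=
  match fuel with
  | 0 => []
  | f + 1 =>
    if m < max_power then
      let top := min (2 * m) max_power
      ((PySem.List.pyRange (m + 1) (top + 1) 1).map (fun t => (t - m, m))) ::
        pvAlt f top max_power
    else []

def plan_parallel_powers_alt (max_power : Int) : List (List (Int × Int)) :=
  if max_power < 2 then []
  else pvAlt (max_power.toNat + 1) 1 max_power

-- ===== PRECONDITION & SPEC =====
def Spec_plan_parallel_powers (max_power : Int) (out : List (List (Int × Int))) : Prop := out = plan_parallel_powers_alt max_power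
instance (max_power : Int) (out : List (List (Int × Int))) : Decidable (Spec_plan_parallel_powers max_power out) := by unfold Spec_plan_parallel_powers; infer_instance

-- ===== CLAIM (what is proved, stated in full; the proofs are below) =====
def Claim_equal_plan_parallel_powers : Prop := ∀ (max_power : Int), Dom_plan_parallel_powers max_power → Spec_plan_parallel_powers max_power (plan_parallel_powers max_power)

-- ===== LEMMAS AND PROOFS =====

-- the contiguous known block 1..M, as the list the algorithm actually builds
lemma pvMem_block (M x : Int) :
    x ∈ PySem.List.pyRange 1 (M + 1) 1 ↔ 1 ≤ x ∧ x ≤ M := by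
  rw [PySem.List.mem_pyRange_one]; omega

lemma pvMin_block (M : Int) (hM : 1 ≤ M) :
    PySem.List.min? (PySem.List.pyRange 1 (M + 1) 1) (fun x => x) = some 1 := by
  rw [PySem.List.pyRange_one_cons (by omega)]
  rw [PySem.List.min?_id_cons]
  congr 1
  have h1 := PySem.List.foldl_min_le (PySem.List.pyRange (1 + 1) (M + 1) 1) (1 : Int)
  have h2 := PySem.List.foldl_min_mem (PySem.List.pyRange (1 + 1) (M + 1) 1) (1 : Int)
  rcases h2 with h2 | h2
  · exact h2
  · rw [PySem.List.mem_pyRange_one] at h2; omega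

lemma pvMax_block (M : Int) (hM : 1 ≤ M) :
    PySem.List.max? (PySem.List.pyRange 1 (M + 1) 1) (fun x => x) = some M := by
  rw [PySem.List.pyRange_one_cons (by omega)]
  rw [PySem.List.max?_id_cons]
  congr 1
  have h1 := PySem.List.le_foldl_max (PySem.List.pyRange (1 + 1) (M + 1) 1) (1 : Int)
  have h2 := PySem.List.foldl_max_mem (PySem.List.pyRange (1 + 1) (M + 1) 1) (1 : Int)
  rcases eq_or_lt_of_le hM with hM1 | hM1
  · rcases h2 with h2 | h2
    · omega
    · rw [PySem.List.mem_pyRange_one] at h2; omega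
  · have hMmem : M ∈ PySem.List.pyRange (1 + 1) (M + 1) 1 := by
      rw [PySem.List.mem_pyRange_one]; omega
    have hub := h1.2 M hMmem
    rcases h2 with h2 | h2
    · omega
    · rw [PySem.List.mem_pyRange_one] at h2; omega

lemma pvSorted_block (M : Int) :
    PySem.List.sorted (PySem.List.pyRange 1 (M + 1) 1) (fun x => x) false
      = PySem.List.pyRange 1 (M + 1) 1 := by
  apply PySem.List.sorted_eq_self_of_pairwise
  exact (PySem.List.pairwise_lt_pyRange_one 1 (M + 1)).imp (fun h => le_of_lt h)

-- folding Set.add over fresh, duplicate-free elements appends them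
lemma pvFoldl_add_append :
    ∀ (l : List Int) (s : PySem.Set Int), l.Nodup → (∀ x ∈ l, x ∉ s) →
      l.foldl PySem.Set.add s = s ++ l := by
  intro l
  induction l with
  | nil => intro s _ _; simp
  | cons x t ih =>
    intro s hnd hfresh
    have hx : x ∉ s := hfresh x (by simp)
    simp only [List.foldl_cons]
    rw [PySem.Set.add_of_not_mem hx]
    rw [ih (s ++ [x]) hnd.of_cons]
    · simp
    · intro y hy
      simp only [List.mem_append, List.mem_singleton]
      rintro (h | h)
      · exact hfresh y (List.mem_cons_of_mem _ hy) h
      · exact (List.nodup_cons.mp hnd).1 (h ▸ hy)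

-- the inner factor scan over sorted_known = [lo..M]: first valid a is t - M
lemma pvFindFactor_block (M t : Int) (hM : 1 ≤ M) (_ht : M < t) :
    ∀ (k : Nat) (lo : Int), (M + 1 - lo).toNat ≤ k → 1 ≤ lo → lo ≤ t - M →
      pvFindFactor (PySem.List.pyRange lo (M + 1) 1) (PySem.List.pyRange 1 (M + 1) 1) t
        = if t ≤ 2 * M then some (t - M, M) else none := by
  intro k
  induction k with
  | zero =>
    intro lo hk h1 h2
    rw [PySem.List.pyRange_one_eq_nil (by omega)]
    rw [if_neg (by omega)]
    rfl
  | succ k ih =>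
    intro lo hk h1 h2
    by_cases hlo : M + 1 ≤ lo
    · rw [PySem.List.pyRange_one_eq_nil hlo]
      rw [if_neg (by omega)]
      rfl
    · rw [PySem.List.pyRange_one_cons (by omega)]
      simp only [pvFindFactor, pvMem_block]
      rcases eq_or_lt_of_le h2 with heq | hlt
      · rw [if_pos (by omega)]
        rw [if_pos (by omega)]
        simp only [Option.some.injEq, Prod.mk.injEq]
        omega
      · rw [if_neg (by omega)]
        exact ih (lo + 1) (by omega) (by omega) (by omega)

-- targets already in `known` are skipped
lemma pvTargetLoop_skip (sk : List Int) (known : PySem.Set Int) :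
    ∀ (ts ts' : List Int) (ops : List (Int × Int)) (nt : PySem.Set Int),
      (∀ t ∈ ts, t ∈ known) →
      pvTargetLoop (ts ++ ts') sk known ops nt = pvTargetLoop ts' sk known ops nt := by
  intro ts
  induction ts with
  | nil => intro ts' ops nt _; rfl
  | cons t ts ih =>
    intro ts' ops nt h
    simp only [List.cons_append, pvTargetLoop]
    rw [if_pos (h t (by simp))]
    exact ih ts' ops nt (fun x hx => h x (List.mem_cons_of_mem _ hx))

-- the target loop from t0 > M fills exactly M+1 .. min(2M, mp)
lemma pvTargetLoop_fill (M mp : Int) (hM : 1 ≤ M) :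
    ∀ (k : Nat) (t0 : Int) (ops : List (Int × Int)) (nt : PySem.Set Int),
      (mp + 1 - t0).toNat ≤ k → M + 1 ≤ t0 → t0 ≤ min (2 * M) mp + 1 →
      pvTargetLoop (PySem.List.pyRange t0 (mp + 1) 1)
          (PySem.List.pyRange 1 (M + 1) 1) (PySem.List.pyRange 1 (M + 1) 1) ops nt
        = (ops ++ (PySem.List.pyRange t0 (min (2 * M) mp + 1) 1).map (fun t => (t - M, M)),
           (PySem.List.pyRange t0 (min (2 * M) mp + 1) 1).foldl PySem.Set.add nt) := by
  intro k
  induction k with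
  | zero =>
    intro t0 ops nt hk hlb hub
    rw [PySem.List.pyRange_one_eq_nil (a := t0) (b := mp + 1) (by omega)]
    rw [PySem.List.pyRange_one_eq_nil (a := t0) (b := min (2 * M) mp + 1) (by omega)]
    simp [pvTargetLoop]
  | succ k ih =>
    intro t0 ops nt hk hlb hub
    by_cases hend : mp + 1 ≤ t0
    · rw [PySem.List.pyRange_one_eq_nil (a := t0) (b := mp + 1) hend]
      rw [PySem.List.pyRange_one_eq_nil (a := t0) (b := min (2 * M) mp + 1) (by omega)]
      simp [pvTargetLoop]
    · rw [PySem.List.pyRange_one_cons (a := t0) (b := mp + 1) (by omega)]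
      simp only [pvTargetLoop]
      rw [if_neg (by rw [pvMem_block]; omega)]
      have hff := pvFindFactor_block M t0 hM (by omega) (M + 1 - 1).toNat 1 (by omega)
        (by omega) (by omega)
      rw [hff]
      by_cases hsmall : t0 ≤ 2 * M
      · rw [if_pos hsmall]
        simp only [ih (t0 + 1) (ops ++ [(t0 - M, M)]) (PySem.Set.add nt t0) (by omega) (by omega)
            (by omega)]
        rw [PySem.List.pyRange_one_cons (a := t0) (b := min (2 * M) mp + 1) (by omega)]
        simp [PySem.Set.add]
      · rw [if_neg hsmall]
        simp only []
        rw [PySem.List.pyRange_one_eq_nil (a := t0) (b := min (2 * M) mp + 1) (by omega)]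
        simp

-- the outer loop on the block 1..M is B's rounds_from(M)
lemma pvOuter_eq_alt (mp : Int) :
    ∀ (fuel : Nat) (M : Int) (rounds : List (List (Int × Int))), 1 ≤ M →
      pvOuter fuel (PySem.List.pyRange 1 (M + 1) 1) rounds mp
        = rounds ++ pvAlt fuel M mp := by
  intro fuel
  induction fuel with
  | zero => intro M rounds _; simp [pvOuter, pvAlt]
  | succ f ih =>
    intro M rounds hM
    unfold pvOuter pvAlt
    simp only [pvMax_block M hM, pvMin_block M hM]
    by_cases hcond : M < mp
    · rw [if_pos hcond, if_pos hcond]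
      rw [pvSorted_block M]
      have hsplit : PySem.List.pyRange (1 + 1) (mp + 1) 1
          = PySem.List.pyRange 2 (M + 1) 1 ++ PySem.List.pyRange (M + 1) (mp + 1) 1 := by
        have := PySem.List.pyRange_one_append 2 (M + 1) (mp + 1) (by omega) (by omega)
        simpa using this
      rw [hsplit]
      rw [pvTargetLoop_skip _ _ _ _ _ _
          (fun t htm => by rw [pvMem_block]; rw [PySem.List.mem_pyRange_one] at htm; omega)]
      rw [pvTargetLoop_fill M mp hM (mp + 1 - (M + 1)).toNat (M + 1) [] PySem.Set.empty
          le_rfl le_rfl (by omega)]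
      have hcons : PySem.List.pyRange (M + 1) (min (2 * M) mp + 1) 1
          = (M + 1) :: PySem.List.pyRange (M + 1 + 1) (min (2 * M) mp + 1) 1 :=
        PySem.List.pyRange_one_cons (by omega)
      have hne : ([] : List (Int × Int))
          ++ (PySem.List.pyRange (M + 1) (min (2 * M) mp + 1) 1).map (fun t => (t - M, M))
          ≠ [] := by rw [hcons]; simp
      rw [if_neg hne]
      have hfold : (PySem.List.pyRange (M + 1) (min (2 * M) mp + 1) 1).foldl PySem.Set.add
            (PySem.Set.empty : PySem.Set Int)
          = PySem.List.pyRange (M + 1) (min (2 * M) mp + 1) 1 := by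
        rw [pvFoldl_add_append _ _ (PySem.List.nodup_pyRange_one _ _) (by simp [PySem.Set.empty])]
        simp [PySem.Set.empty]
      have hunion : PySem.Set.union (PySem.List.pyRange 1 (M + 1) 1)
            (PySem.List.pyRange (M + 1) (min (2 * M) mp + 1) 1)
          = PySem.List.pyRange 1 (min (2 * M) mp + 1) 1 := by
        show (PySem.List.pyRange (M + 1) (min (2 * M) mp + 1) 1).foldl PySem.Set.add
            (PySem.List.pyRange 1 (M + 1) 1) = _
        rw [pvFoldl_add_append _ _ (PySem.List.nodup_pyRange_one _ _)
            (fun x hx => by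
              rw [PySem.List.mem_pyRange_one] at hx
              rw [pvMem_block]; omega)]
        exact (PySem.List.pyRange_one_append 1 (M + 1) (min (2 * M) mp + 1)
            (by omega) (by omega)).symm
      simp only [hfold, hunion]
      rw [ih (min (2 * M) mp) (rounds ++ [[] ++ (PySem.List.pyRange (M + 1)
          (min (2 * M) mp + 1) 1).map (fun t => (t - M, M))]) (by omega)]
      simp
    · rw [if_neg hcond, if_neg hcond]
      simp

-- ===== VERDICT (by name: the statement is the Claim_ definition above) =====
theorem plan_parallel_powers_spec : Claim_equal_plan_parallel_powers := by
  intro mp _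
  show plan_parallel_powers mp = plan_parallel_powers_alt mp
  unfold plan_parallel_powers plan_parallel_powers_alt
  by_cases h : mp < 2
  · rw [if_pos h, if_pos h]
  · rw [if_neg h, if_neg h]
    have h1 : PySem.Set.ofList [(1 : Int)] = PySem.List.pyRange 1 (1 + 1) 1 := by
      rw [PySem.List.pyRange_one_singleton]; rfl
    rw [h1, pvOuter_eq_alt mp (mp.toNat + 1) 1 [] le_rfl]
    simp
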